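-- pv_equiv track=rewrite | github.com/ChinWeiKuan/MediPilot | OccupancyGrid.py | simplify_cells_path
-- ===== SOURCE A (Python) =====
-- def simplify_cells_path(path_cells):
--     """
--     將逐格路徑簡化為「每段直線的端點」清單。
--     修正：遇到方向改變時，加入的是「上一段的最後一點 (x1,y1)」，而不是新方向的第一點，
--     以避免連續端點之間出現斜向位移（如 (-1,1)）。
--     """
--     n = len(path_cells)
--     if n <= 2:
--         return path_cells[:]  # 0,1,2 點均不需簡化或已是最簡
--
--     simp = [path_cells[0]]
--     # 前一段方向
--     def norm_step(dx, dy):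
--         dx = 0 if dx == 0 else (1 if dx > 0 else -1)
--         dy = 0 if dy == 0 else (1 if dy > 0 else -1)
--         return dx, dy
--
--     prev_dx = prev_dy = None
--     for (x1, y1), (x2, y2) in zip(path_cells, path_cells[1:]):
--         dx, dy = norm_step(x2 - x1, y2 - y1)
--         if (dx, dy) != (prev_dx, prev_dy):
--             # 方向發生改變：把上一段的最後一點 (x1,y1) 當作轉角端點加入
--             if prev_dx is not None:
--                 simp.append((x1, y1))
--             prev_dx, prev_dy = dx, dy
--     # 迴圈結束後，補上最終端點
--     if simp[-1] != path_cells[-1]: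
--         simp.append(path_cells[-1])
--     return simp
-- ===== SOURCE B (Python) =====
-- def simplify_cells_path(path_cells):
--     n = len(path_cells)
--     if n <= 2:
--         return path_cells[:]
--
--     def step(a, b):
--         dx = b[0] - a[0]
--         dy = b[1] - a[1]
--         return ((dx > 0) - (dx < 0), (dy > 0) - (dy < 0))
--
--     # two-pointer run skipping: jump from the start of each maximal straight
--     # segment to its end and record only the segment endpoints
--     r = [path_cells[0]]
--     i = 0
--     while i < n - 1:
--         d = step(path_cells[i], path_cells[i + 1])
--         j = i + 1
--         while j < n - 1 and step(path_cells[j], path_cells[j + 1]) == d: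
--             j += 1
--         r.append(path_cells[j])
--         i = j
--     if r[-1] == r[-2]:
--         r.pop()
--     return r
-- ===== Notes on version B (the rewrite author's own statement) =====
-- stated objective: alternative
-- what changed: Replaces A's per-point stateful scan (accumulator list plus a tracked previous-direction Optional compared at every step) by a two-pointer run-skipping loop: an outer loop over maximal straight segments whose inner pointer jumps to each segment's end, recording only segment endpoints.
import Mathlib
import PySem

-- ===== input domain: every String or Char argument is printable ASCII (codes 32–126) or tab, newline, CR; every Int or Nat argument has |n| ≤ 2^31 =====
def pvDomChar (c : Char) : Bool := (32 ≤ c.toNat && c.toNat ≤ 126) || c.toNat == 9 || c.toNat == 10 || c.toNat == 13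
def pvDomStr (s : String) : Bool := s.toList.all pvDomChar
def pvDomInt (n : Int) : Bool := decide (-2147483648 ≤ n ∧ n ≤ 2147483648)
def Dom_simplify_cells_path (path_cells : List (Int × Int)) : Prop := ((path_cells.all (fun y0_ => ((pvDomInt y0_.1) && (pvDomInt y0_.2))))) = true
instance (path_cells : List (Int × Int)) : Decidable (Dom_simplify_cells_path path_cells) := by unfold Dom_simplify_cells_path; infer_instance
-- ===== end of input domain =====

-- B replaces A's per-point stateful direction-change scan by a two-pointer
-- run-skipping loop over maximal straight segments (objective: alternative).

-- ===== PORT A =====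
-- norm_step(dx, dy) of A
def pvNormStepA (dx dy : Int) : Int × Int :=
  ((if dx = 0 then 0 else if dx > 0 then 1 else -1),
   (if dy = 0 then 0 else if dy > 0 then 1 else -1))

-- the body of A's for-loop: state = (simp, prev direction or None)
def pvStepA (s : List (Int × Int) × Option (Int × Int)) (pr : (Int × Int) × (Int × Int)) :
    List (Int × Int) × Option (Int × Int) :=
  let d := pvNormStepA (pr.2.1 - pr.1.1) (pr.2.2 - pr.1.2)
  if some d ≠ s.2 then
    ((if s.2.isSome then s.1 ++ [pr.1] else s.1), some d)
  else s

def simplify_cells_path (path_cells : List (Int × Int)) : List (Int × Int) :=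
  if path_cells.length ≤ 2 then path_cells
  else
    match path_cells with
    | [] => []        -- unreachable: length > 2
    | h :: _ =>
      let simp := ((path_cells.zip path_cells.tail).foldl pvStepA ([h], none)).1
      -- simp[-1] / path_cells[-1]: both lists are nonempty here, so getLast? is some
      if simp.getLast? ≠ path_cells.getLast? then simp ++ path_cells.getLast?.toList
      else simp

-- ===== PORT B =====
-- B's step(a, b) via (dx > 0) - (dx < 0)
def pvStepB (a b : Int × Int) : Int × Int :=
  ((if b.1 - a.1 > 0 then 1 else 0) - (if b.1 - a.1 < 0 then 1 else 0),
   (if b.2 - a.2 > 0 then 1 else 0) - (if b.2 - a.2 < 0 then 1 else 0))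

-- inner while of B: advance j while the direction stays d
-- (all loop indices are provably in range, so p[j] is ported as getD; exact here)
def pvRunEndB (p : List (Int × Int)) (d : Int × Int) (j : Nat) : Nat :=
  if h : j < p.length - 1 ∧ pvStepB (p.getD j (0, 0)) (p.getD (j + 1) (0, 0)) = d then
    pvRunEndB p d (j + 1)
  else j
termination_by p.length - j
decreasing_by omega

-- needed by pvSegLoop's termination proof (cited in decreasing_by)
theorem pvRunEndB_ge (p : List (Int × Int)) (d : Int × Int) (j : Nat) :
    j ≤ pvRunEndB p d j := by
  fun_induction pvRunEndB p d j with
  | case1 j h ih =>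
    exact le_trans (Nat.le_succ j) ih
  | case2 j _ => exact le_refl j

-- outer while of B: one iteration per maximal straight segment
def pvSegLoop (p : List (Int × Int)) (r : List (Int × Int)) (i : Nat) : List (Int × Int) :=
  if _h : i < p.length - 1 then
    let d := pvStepB (p.getD i (0, 0)) (p.getD (i + 1) (0, 0))
    let j := pvRunEndB p d (i + 1)
    pvSegLoop p (r ++ [p.getD j (0, 0)]) j
  else r
termination_by p.length - i
decreasing_by
  have := pvRunEndB_ge p (pvStepB (p.getD i (0, 0)) (p.getD (i + 1) (0, 0))) (i + 1)
  omega

def simplify_cells_path_alt (path_cells : List (Int × Int)) : List (Int × Int) :=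
  if path_cells.length ≤ 2 then path_cells
  else
    let r := pvSegLoop path_cells [path_cells.getD 0 (0, 0)] 0
    -- r[-1] / r[-2]: r has length ≥ 2 here, so both indices are in range
    if r.getD (r.length - 1) (0, 0) = r.getD (r.length - 2) (0, 0) then r.dropLast else r

-- ===== PRECONDITION & SPEC =====
def Spec_simplify_cells_path (path_cells : List (Int × Int)) (out : List (Int × Int)) : Prop := out = simplify_cells_path_alt path_cells
instance (path_cells : List (Int × Int)) (out : List (Int × Int)) : Decidable (Spec_simplify_cells_path path_cells out) := by unfold Spec_simplify_cells_path; infer_instance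

-- ===== CLAIM (what is proved, stated in full; the proofs are below) =====
def Claim_equal_simplify_cells_path : Prop := ∀ (path_cells : List (Int × Int)), Dom_simplify_cells_path path_cells → Spec_simplify_cells_path path_cells (simplify_cells_path path_cells)

-- ===== LEMMAS AND PROOFS =====

-- the two step formulations agree
theorem pvNormStep_eq (a b : Int × Int) :
    pvStepB a b = pvNormStepA (b.1 - a.1) (b.2 - a.2) := by
  unfold pvNormStepA pvStepB
  simp only [Prod.mk.injEq]
  constructor <;> split_ifs <;> omega

-- the corner points produced by A's scan after a pair (x, y) has been
-- processed (prev = direction x→y); l is the rest of the path after y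
def pvCorners (x y : Int × Int) : List (Int × Int) → List (Int × Int)
  | [] => []
  | z :: l =>
    (if pvNormStepA (z.1 - y.1) (z.2 - y.2) ≠ pvNormStepA (y.1 - x.1) (y.2 - x.2)
     then [y] else []) ++ pvCorners y z l

-- the final prev direction of A's scan
def pvPrev (x y : Int × Int) : List (Int × Int) → Option (Int × Int)
  | [] => some (pvNormStepA (y.1 - x.1) (y.2 - x.2))
  | z :: l => pvPrev y z l

theorem foldA_spec (l : List (Int × Int)) : ∀ (x y : Int × Int) (acc : List (Int × Int)),
    ((y :: l).zip l).foldl pvStepA (acc, some (pvNormStepA (y.1 - x.1) (y.2 - x.2)))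
      = (acc ++ pvCorners x y l, pvPrev x y l) := by
  induction l with
  | nil => intro x y acc; simp [pvCorners, pvPrev]
  | cons z l ih =>
    intro x y acc
    have hstep : pvStepA (acc, some (pvNormStepA (y.1 - x.1) (y.2 - x.2))) (y, z)
        = (acc ++ (if pvNormStepA (z.1 - y.1) (z.2 - y.2) ≠ pvNormStepA (y.1 - x.1) (y.2 - x.2)
                   then [y] else []),
           some (pvNormStepA (z.1 - y.1) (z.2 - y.2))) := by
      unfold pvStepA
      by_cases h : pvNormStepA (z.1 - y.1) (z.2 - y.2) = pvNormStepA (y.1 - x.1) (y.2 - x.2) <;>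
        simp [h]
    simp only [List.zip_cons_cons, List.foldl_cons, hstep, ih y z, pvCorners, pvPrev,
      List.append_assoc]

-- segment endpoints of the path a :: b :: l
def pvEnds (a b : Int × Int) : List (Int × Int) → List (Int × Int)
  | [] => [b]
  | c :: l => if pvStepB b c = pvStepB a b then pvEnds b c l else b :: pvEnds b c l

-- list-level version of B's inner while loop
def pvRunL (b : Int × Int) (d : Int × Int) : List (Int × Int) → (Int × Int) × List (Int × Int)
  | [] => (b, [])
  | c :: l => if pvStepB b c = d then pvRunL c d l else (b, c :: l)

-- pvEnds factored through pvRunL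
theorem ends_run (l : List (Int × Int)) : ∀ (a b : Int × Int),
    pvEnds a b l = (match pvRunL b (pvStepB a b) l with
                    | (e, []) => [e]
                    | (e, c :: l') => e :: pvEnds e c l') := by
  induction l with
  | nil => intro a b; simp [pvEnds, pvRunL]
  | cons c l ih =>
    intro a b
    by_cases h : pvStepB b c = pvStepB a b
    · simp [pvEnds, pvRunL, h, ih b c]
    · simp [pvEnds, pvRunL, h]

-- B's inner index loop computes pvRunL on the dropped list
theorem runEnd_runL (p : List (Int × Int)) (d : Int × Int) : ∀ (j : Nat), j < p.length →
    (p.getD (pvRunEndB p d j) (0, 0), p.drop (pvRunEndB p d j + 1))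
      = pvRunL (p.getD j (0, 0)) d (p.drop (j + 1)) := by
  intro j hj
  fun_induction pvRunEndB p d j with
  | case1 j h ih =>
    rw [ih (by omega)]
    have hj1 : j + 1 < p.length := by omega
    rw [List.drop_eq_getElem_cons hj1]
    simp only [pvRunL]
    rw [if_pos]
    · congr 1
      all_goals simp [List.getD, List.getElem?_eq_getElem hj1]
    · have := h.2
      simpa [List.getD, List.getElem?_eq_getElem hj1] using this
  | case2 j h =>
    rcases Nat.lt_or_ge (j + 1) p.length with h1 | h1
    · have hcond : ¬ pvStepB (p.getD j (0, 0)) (p.getD (j + 1) (0, 0)) = d := by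
        intro hc; exact h ⟨by omega, hc⟩
      rw [List.drop_eq_getElem_cons h1]
      simp only [pvRunL]
      rw [if_neg (by simpa [List.getD, List.getElem?_eq_getElem h1] using hcond)]
    · have : p.drop (j + 1) = [] := List.drop_eq_nil_of_le h1
      simp [this, pvRunL]

-- B's outer index loop computes pvEnds on the dropped list
theorem segLoop_ends (p : List (Int × Int)) : ∀ (k i : Nat) (r : List (Int × Int)),
    p.length - i ≤ k → i + 1 < p.length →
    pvSegLoop p r i
      = r ++ pvEnds (p.getD i (0, 0)) (p.getD (i + 1) (0, 0)) (p.drop (i + 2)) := by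
  intro k
  induction k with
  | zero => intro i r hk hi; omega
  | succ k ih =>
    intro i r hk hi
    have hlt : i < p.length - 1 := by omega
    rw [pvSegLoop, dif_pos hlt]
    set d := pvStepB (p.getD i (0, 0)) (p.getD (i + 1) (0, 0)) with hd
    set j := pvRunEndB p d (i + 1) with hj
    have hji : i + 1 ≤ j := pvRunEndB_ge p d (i + 1)
    have hrl := runEnd_runL p d (i + 1) (by omega)
    rw [ends_run, ← hd]
    show pvSegLoop p (r ++ [p.getD (pvRunEndB p d (i + 1)) (0, 0)]) (pvRunEndB p d (i + 1)) = _
    rw [← hj, ← hrl]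
    rcases hdrop : p.drop (j + 1) with _ | ⟨c, l'⟩
    · have hge : p.length ≤ j + 1 := by
        by_contra hc
        rw [List.drop_eq_getElem_cons (by omega)] at hdrop
        exact List.cons_ne_nil _ _ hdrop
      rw [pvSegLoop, dif_neg (show ¬ j < p.length - 1 by omega)]
    · have hj1 : j + 1 < p.length := by
        by_contra hc
        rw [List.drop_eq_nil_of_le (by omega)] at hdrop
        exact List.cons_ne_nil _ _ hdrop.symm
      have hexp := hdrop
      rw [List.drop_eq_getElem_cons hj1] at hexp
      injection hexp with hc hl'
      have hg : p.getD (j + 1) (0, 0) = p[j + 1] := by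
        simp [List.getD, List.getElem?_eq_getElem hj1]
      rw [ih j (r ++ [p.getD j (0, 0)]) (by omega) (by omega), ← hj]
      simp only [← hc, ← hl']
      simp only [List.append_assoc, List.singleton_append]
      congr 2
      simp [List.getElem?_eq_getElem hj1]

theorem getLast?_eq_getLastD {α : Type} (l : List α) : ∀ (b : α),
    (b :: l).getLast? = some (l.getLastD b) := by
  induction l with
  | nil => intro b; simp [List.getLastD]
  | cons c l ih => intro b; rw [List.getLast?_cons_cons, ih c, List.getLastD_cons]

-- pvEnds = A's corners followed by the last point of the path
theorem ends_corners (l : List (Int × Int)) : ∀ (a b : Int × Int),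
    pvEnds a b l = pvCorners a b l ++ [l.getLastD b] := by
  induction l with
  | nil => intro a b; simp [pvEnds, pvCorners, List.getLastD]
  | cons c l ih =>
    intro a b
    by_cases h : pvStepB b c = pvStepB a b
    · have hA : pvNormStepA (c.1 - b.1) (c.2 - b.2) = pvNormStepA (b.1 - a.1) (b.2 - a.2) := by
        rw [← pvNormStep_eq, ← pvNormStep_eq]; exact h
      simp [pvEnds, pvCorners, h, hA, ih b c, getLast?_eq_getLastD, List.getLastD_eq_getLast?]
    · have hA : ¬ pvNormStepA (c.1 - b.1) (c.2 - b.2) = pvNormStepA (b.1 - a.1) (b.2 - a.2) := by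
        rw [← pvNormStep_eq, ← pvNormStep_eq]; exact h
      simp [pvEnds, pvCorners, h, hA, ih b c, getLast?_eq_getLastD, List.getLastD_eq_getLast?]

-- getD at the last / second-to-last index of a :: (t ++ [x])
theorem getD_last1 {α : Type} (t : List α) (a x d : α) :
    (a :: (t ++ [x])).getD ((a :: (t ++ [x])).length - 1) d = x := by
  have h1 : (a :: (t ++ [x])).length - 1 = t.length + 1 := by simp
  rw [h1, List.getD_cons_succ]
  simp [List.getD]

theorem getD_last2 {α : Type} (t : List α) (a x d : α) :
    (a :: (t ++ [x])).getD ((a :: (t ++ [x])).length - 2) d = t.getLastD a := by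
  induction t generalizing a with
  | nil => simp [List.getD, List.getLastD]
  | cons c t ih =>
    rw [List.cons_append]
    have h1 : (a :: c :: (t ++ [x])).length - 2 = t.length + 1 := by simp
    rw [h1, List.getD_cons_succ]
    have h2 : (c :: (t ++ [x])).length - 2 = t.length := by simp
    have h3 := ih c
    rw [h2] at h3
    rw [h3, List.getLastD_cons]

theorem dropLast_cons_concat {α : Type} (t : List α) (a x : α) :
    (a :: (t ++ [x])).dropLast = a :: t := by
  rw [← List.cons_append, List.dropLast_concat]

-- ===== VERDICT (by name: the statement is the Claim_ definition above) =====
theorem simplify_cells_path_spec : Claim_equal_simplify_cells_path := by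
  intro p _
  unfold Spec_simplify_cells_path simplify_cells_path simplify_cells_path_alt
  by_cases hlen : p.length ≤ 2
  · simp [hlen]
  · match p, hlen with
    | a :: b :: c :: l, hl =>
      -- A side: the fold produces [a] ++ corners
      have hfirst : pvStepA ([a], none) (a, b)
          = ([a], some (pvNormStepA (b.1 - a.1) (b.2 - a.2))) := by
        unfold pvStepA; simp
      have e1 : List.foldl pvStepA ([a], none) ((a :: b :: c :: l).zip (b :: c :: l))
          = ([a] ++ pvCorners a b (c :: l), pvPrev a b (c :: l)) := by
        show List.foldl pvStepA ([a], none) ((a, b) :: ((b :: c :: l).zip (c :: l))) = _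
        rw [List.foldl_cons, hfirst, foldA_spec]
      -- B side: the segment loop produces [a] ++ pvEnds a b (c :: l)
      have e2 : pvSegLoop (a :: b :: c :: l) [a] 0 = [a] ++ pvEnds a b (c :: l) := by
        have h := segLoop_ends (a :: b :: c :: l) (a :: b :: c :: l).length 0 [a]
          (le_refl _) (by simp)
        simpa [List.getD] using h
      have e3 : pvEnds a b (c :: l) = pvCorners a b (c :: l) ++ [(c :: l).getLastD b]
        := ends_corners (c :: l) a b
      have hlast : (a :: b :: c :: l).getLast? = some ((c :: l).getLastD b) := by
        rw [List.getLast?_cons_cons, getLast?_eq_getLastD (c :: l) b]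
      simp only [if_neg hl, List.tail_cons, e1, List.getD_cons_zero, e2, e3]
      set t := pvCorners a b (c :: l) with ht
      set L := (c :: l).getLastD b with hL
      have g1 := getD_last1 t a L ((0 : Int), (0 : Int))
      have g2 := getD_last2 t a L ((0 : Int), (0 : Int))
      have gl : ([a] ++ t).getLast? = some (t.getLastD a) := getLast?_eq_getLastD t a
      show (if ([a] ++ t).getLast? ≠ _ then _ else _) = _
      rw [gl, hlast]
      have hcons : [a] ++ (t ++ [L]) = a :: (t ++ [L]) := rfl
      rw [hcons, g1, g2, dropLast_cons_concat]
      simp only [List.getLastD_eq_getLast?]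
      by_cases h : t.getLast?.getD a = L
      · rw [if_neg (by simp [h]), if_pos (Eq.symm h)]
        rfl
      · rw [if_pos (by simp [h]), if_neg (fun e => h (Eq.symm e))]
        simp
    | [], h => exact absurd (by simp) h
    | [x], h => exact absurd (by simp) h
    | [x, y], h => exact absurd (by simp) h
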